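-- pv_equiv track=rewrite | github.com/JuanCerquera/job-search-automation | linkedin-job-scraper/scraper.py | _tokenize_filter_expression
-- ===== SOURCE A (Python) =====
-- from typing import Dict, List, Tuple, Any
--
-- def _tokenize_filter_expression(expression: str) -> List[str]:
--     tokens: List[str] = []
--     i = 0
--     while i < len(expression):
--         ch = expression[i]
--         if ch.isspace():
--             i += 1
--             continue
--         if ch in ("(", ")", "&", "|"):
--             tokens.append(ch)
--             i += 1
--             continue
--         if ch in ("'", '"'):
--             quote = ch
--             i += 1
--             start = i
--             while i < len(expression) and expression[i] != quote:
--                 i += 1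
--             if i >= len(expression):
--                 raise ValueError("Unclosed quote in TITLE_FILTER_EXPRESSION")
--             tokens.append(expression[start:i].strip())
--             i += 1
--             continue
--
--         start = i
--         while i < len(expression) and (not expression[i].isspace()) and expression[i] not in "()&|":
--             i += 1
--         tokens.append(expression[start:i].strip())
--
--     return [t for t in tokens if t]
-- ===== SOURCE B (Python) =====
-- def _tokenize_filter_expression(expression):
--     tokens = []
--     buf = []
--     quote = None
--     for ch in expression:
--         if quote is not None:
--             if ch == quote:
--                 t = ''.join(buf).strip()
--                 if t:
--                     tokens.append(t)
--                 buf = []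
--                 quote = None
--             else:
--                 buf.append(ch)
--         elif not buf and ch in "'\"":
--             quote = ch
--         elif ch.isspace() or ch in "()&|":
--             if buf:
--                 tokens.append(''.join(buf))
--                 buf = []
--             if ch in "()&|":
--                 tokens.append(ch)
--         else:
--             buf.append(ch)
--     if quote is not None:
--         raise ValueError("Unclosed quote in TITLE_FILTER_EXPRESSION")
--     if buf:
--         tokens.append(''.join(buf))
--     return tokens
-- ===== Notes on version B (the rewrite author's own statement) =====
-- stated objective: alternative
-- what changed: A's index-driven while loop with nested inner scanning loops and slice extraction is replaced by a single left-to-right pass driven by an explicit state machine (current buffer, open-quote state) that flushes tokens as delimiters arrive; joining a buffered list avoids per-character index arithmetic and repeated slicing.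
import Mathlib
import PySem

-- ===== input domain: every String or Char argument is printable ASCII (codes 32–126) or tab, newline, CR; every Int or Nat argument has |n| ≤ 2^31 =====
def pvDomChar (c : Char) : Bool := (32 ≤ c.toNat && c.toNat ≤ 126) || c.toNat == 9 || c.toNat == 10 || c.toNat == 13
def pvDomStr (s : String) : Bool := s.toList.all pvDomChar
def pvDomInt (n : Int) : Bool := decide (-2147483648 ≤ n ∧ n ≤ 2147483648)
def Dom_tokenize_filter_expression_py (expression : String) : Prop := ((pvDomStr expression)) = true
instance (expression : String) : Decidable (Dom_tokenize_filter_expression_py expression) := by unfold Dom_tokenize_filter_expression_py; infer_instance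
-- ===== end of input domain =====

-- B replaces A's index-driven while loop with inner scanning loops and slicing by a single
-- left-to-right pass over the characters with an explicit state (current buffer, open quote),
-- flushing tokens as delimiters arrive (objective: alternative single-pass state machine; a timing run measured it faster by a constant factor).

-- shared character classes (the literal sets A and B both test against)
def pvSpecial (c : Char) : Bool := c = '(' || c = ')' || c = '&' || c = '|'
def pvQuote (c : Char) : Bool := c = '\'' || c = '"'

-- ===== PORT A =====
-- inner while loop "while i < len and expression[i] != quote": returns (content, rest after quote), none = unclosed quote
def scanQuoteA (q : Char) : List Char → Option (List Char × List Char)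
  | [] => none
  | c :: cs =>
    if c = q then some ([], cs)
    else
      match scanQuoteA q cs with
      | none => none
      | some p => some (c :: p.1, p.2)

-- inner while loop collecting a bareword run
def scanWordA : List Char → List Char × List Char
  | [] => ([], [])
  | c :: cs =>
    if PySem.Chars.isspace c || pvSpecial c then ([], c :: cs)
    else
      let p := scanWordA cs
      (c :: p.1, p.2)

theorem scanWordA_rest_le (cs : List Char) : (scanWordA cs).2.length ≤ cs.length := by
  induction cs with
  | nil => simp [scanWordA]
  | cons c cs ih =>
    simp only [scanWordA]
    split
    · simp
    · simpa using Nat.le_succ_of_le ih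

theorem scanQuoteA_rest_le (q : Char) (cs : List Char) (p : List Char × List Char)
    (h : scanQuoteA q cs = some p) : p.2.length ≤ cs.length := by
  induction cs generalizing p with
  | nil => simp [scanQuoteA] at h
  | cons c cs ih =>
    simp only [scanQuoteA] at h
    split at h
    · cases h; simp
    · cases hrec : scanQuoteA q cs with
      | none => simp [hrec] at h
      | some p' =>
        simp only [hrec] at h
        cases h
        simpa using Nat.le_succ_of_le (ih p' hrec)

-- the outer while loop of A (tokens kept as char lists; turned into Strings at the end)
def goA (tokens : List (List Char)) : List Char → List (List Char)
  | [] => tokens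
  | c :: cs =>
    if PySem.Chars.isspace c then goA tokens cs
    else if pvSpecial c then goA (tokens ++ [[c]]) cs
    else if pvQuote c then
      match h : scanQuoteA c cs with
      | none => tokens   -- Python raises ValueError here; excluded by Pre_
      | some p => goA (tokens ++ [PySem.Chars.strip p.1]) p.2
    else
      goA (tokens ++ [PySem.Chars.strip (c :: (scanWordA cs).1)]) (scanWordA cs).2
  termination_by l => l.length
  decreasing_by
  all_goals
    try have h1 := scanQuoteA_rest_le c cs p h
    try have h2 := scanWordA_rest_le cs
    simp
    try omega

def tokenize_filter_expression_py (expression : String) : List String :=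
  ((goA [] expression.toList).filter (fun t => !t.isEmpty)).map String.mk

-- ===== PORT B =====
-- one step of B's for-loop; state = (tokens so far, current buffer, open quote char if any)
def stepB (st : List (List Char) × List Char × Option Char) (c : Char) :
    List (List Char) × List Char × Option Char :=
  match st with
  | (tokens, buf, some q) =>
    if c = q then
      let t := PySem.Chars.strip buf
      (if t.isEmpty then tokens else tokens ++ [t], [], none)
    else (tokens, buf ++ [c], some q)
  | (tokens, buf, none) =>
    if buf.isEmpty && pvQuote c then (tokens, [], some c)
    else if PySem.Chars.isspace c || pvSpecial c then
      let tokens' := if buf.isEmpty then tokens else tokens ++ [buf]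
      (if pvSpecial c then tokens' ++ [[c]] else tokens', [], none)
    else (tokens, buf ++ [c], none)

-- the epilogue after the loop (on an open quote Python B raises ValueError; excluded by Pre_)
def finishB (st : List (List Char) × List Char × Option Char) : List (List Char) :=
  match st with
  | (tokens, _, some _) => tokens
  | (tokens, buf, none) => if buf.isEmpty then tokens else tokens ++ [buf]

def tokenize_filter_expression_py_alt (expression : String) : List String :=
  (finishB (expression.toList.foldl stepB ([], [], none))).map String.mk

-- ===== PRECONDITION & SPEC =====
-- quote-balance automaton: top level / inside a bareword / inside a quote opened by q
inductive PvTokState where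
  | top : PvTokState
  | word : PvTokState
  | quoted : Char → PvTokState
deriving DecidableEq, Repr

def pvWellQuoted : PvTokState → List Char → Bool
  | .quoted _, [] => false
  | _, [] => true
  | .quoted q, c :: cs => if c = q then pvWellQuoted .top cs else pvWellQuoted (.quoted q) cs
  | .top, c :: cs =>
    if pvQuote c then pvWellQuoted (.quoted c) cs
    else if PySem.Chars.isspace c || pvSpecial c then pvWellQuoted .top cs
    else pvWellQuoted .word cs
  | .word, c :: cs =>
    if PySem.Chars.isspace c || pvSpecial c then pvWellQuoted .top cs
    else pvWellQuoted .word cs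

-- Pre_ excludes exactly the expressions with an unterminated quoted span, on which A raises ValueError
def Pre_tokenize_filter_expression_py (expression : String) : Prop :=
  pvWellQuoted .top expression.toList = true
instance (expression : String) : Decidable (Pre_tokenize_filter_expression_py expression) := by
  unfold Pre_tokenize_filter_expression_py; infer_instance

def pvWitness_tokenize_filter_expression_py : String := "('senior engineer' & python) | \"ml ops\""

def Spec_tokenize_filter_expression_py (expression : String) (out : List String) : Prop :=
  out = tokenize_filter_expression_py_alt expression
instance (expression : String) (out : List String) :
    Decidable (Spec_tokenize_filter_expression_py expression out) := by
  unfold Spec_tokenize_filter_expression_py; infer_instance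

-- ===== CLAIM (what is proved, stated in full; the proofs are below) =====
def Claim_equal_tokenize_filter_expression_py : Prop := ∀ (expression : String), Dom_tokenize_filter_expression_py expression → Pre_tokenize_filter_expression_py expression → Spec_tokenize_filter_expression_py expression (tokenize_filter_expression_py expression)

-- ===== LEMMAS AND PROOFS =====

theorem stepB_prefix (T : List (List Char)) (buf : List Char) (q : Option Char) (c : Char) :
    stepB (T, buf, q) c = ((T ++ (stepB ([], buf, q) c).1, (stepB ([], buf, q) c).2)) := by
  cases q <;> (simp only [stepB]; split_ifs <;> simp)

theorem foldl_stepB_prefix (l : List Char) (T : List (List Char)) (buf : List Char)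
    (q : Option Char) :
    l.foldl stepB (T, buf, q) =
      (T ++ (l.foldl stepB ([], buf, q)).1, (l.foldl stepB ([], buf, q)).2) := by
  induction l generalizing T buf q with
  | nil => simp
  | cons c l ih =>
    simp only [List.foldl_cons]
    rw [stepB_prefix]
    rcases h : stepB ([], buf, q) c with ⟨U, buf', q'⟩
    rw [ih _ buf' q', ih U buf' q']
    simp

theorem finishB_prefix (T : List (List Char)) (st : List (List Char) × List Char × Option Char) :
    finishB (T ++ st.1, st.2) = T ++ finishB st := by
  rcases st with ⟨U, buf, q⟩
  cases q <;> simp only [finishB] <;> split <;> simp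

-- B's fold across a quoted span = emit the stripped content (if nonempty) and continue
theorem foldl_stepB_quoted (q : Char) (l : List Char) (p : List Char × List Char)
    (h : scanQuoteA q l = some p) (T : List (List Char)) (buf : List Char) :
    l.foldl stepB (T, buf, some q) =
      p.2.foldl stepB
        ((if (PySem.Chars.strip (buf ++ p.1)).isEmpty then T
          else T ++ [PySem.Chars.strip (buf ++ p.1)]), [], none) := by
  induction l generalizing p buf with
  | nil => simp [scanQuoteA] at h
  | cons c l ih =>
    simp only [scanQuoteA] at h
    split at h
    · rename_i hc
      cases h
      subst hc
      simp [stepB]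
    · rename_i hc
      cases hrec : scanQuoteA q l with
      | none => simp [hrec] at h
      | some p' =>
        simp only [hrec] at h
        cases h
        simp only [List.foldl_cons, stepB, if_neg hc]
        rw [ih p' hrec (buf ++ [c])]
        simp

-- quote characters never terminate a bareword / whitespace-special chars are never quotes
theorem pvQuote_term (c : Char) (h : (PySem.Chars.isspace c || pvSpecial c) = true) :
    pvQuote c = false := by
  by_contra hq
  have : c = '\'' ∨ c = '"' := by
    have hq' : pvQuote c = true := by simpa using hq
    simpa [pvQuote] using hq'
  rcases this with rfl | rfl <;> exact absurd h (by decide)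

-- B's fold across a bareword run = append the full word and reprocess the rest from neutral state
theorem foldl_stepB_word (l : List Char) (U : List (List Char)) (buf : List Char)
    (hb : buf ≠ []) :
    finishB (l.foldl stepB (U, buf, none)) =
      finishB ((scanWordA l).2.foldl stepB (U ++ [buf ++ (scanWordA l).1], [], none)) := by
  induction l generalizing U buf with
  | nil =>
    simp [scanWordA, finishB, hb]
  | cons c l ih =>
    by_cases hterm : (PySem.Chars.isspace c || pvSpecial c) = true
    · -- c terminates the word: both sides flush and then process c from the neutral state
      simp only [scanWordA, if_pos hterm, List.foldl_cons]
      have h1 : stepB (U, buf, none) c = stepB (U ++ [buf], [], none) c := by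
        simp [stepB, hb, hterm, pvQuote_term c hterm]
      rw [h1]
      simp
    · -- c extends the word
      simp only [scanWordA, if_neg hterm, List.foldl_cons]
      have h1 : stepB (U, buf, none) c = (U, buf ++ [c], none) := by
        have hq : (buf.isEmpty && pvQuote c) = false := by simp [hb]
        simp [stepB, hq, hterm]
      rw [h1, ih U (buf ++ [c]) (by simp)]
      simp

-- bareword characters are never whitespace
theorem scanWordA_no_space (l : List Char) :
    ∀ c ∈ (scanWordA l).1, PySem.Chars.isspace c = false := by
  induction l with
  | nil => simp [scanWordA]
  | cons c l ih =>
    by_cases hterm : (PySem.Chars.isspace c || pvSpecial c) = true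
    · simp [scanWordA, hterm]
    · intro x hx
      simp only [scanWordA, if_neg hterm] at hx
      simp only [List.mem_cons] at hx
      rcases hx with rfl | hx
      · simp only [Bool.or_eq_true, not_or] at hterm
        simpa using hterm.1
      · exact ih x hx

-- strip is the identity on a list with no whitespace at all
theorem strip_of_no_space (l : List Char) (h : ∀ c ∈ l, PySem.Chars.isspace c = false) :
    PySem.Chars.strip l = l := by
  have h1 : List.dropWhile PySem.Chars.isspace l = l := by
    cases l with
    | nil => rfl
    | cons c cs => simp [List.dropWhile, h c (by simp)]
  have h2 : List.dropWhile PySem.Chars.isspace l.reverse = l.reverse := by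
    cases hr : l.reverse with
    | nil => rfl
    | cons c cs =>
      have : c ∈ l := by
        have : c ∈ l.reverse := by rw [hr]; simp
        simpa using this
      simp [List.dropWhile, h c this]
  simp [PySem.Chars.strip, PySem.Chars.lstrip, PySem.Chars.rstrip, h1, h2]

-- the well-quotedness automaton follows A's scans
theorem pvWellQuoted_word (l : List Char) :
    pvWellQuoted .word l = pvWellQuoted .top (scanWordA l).2 := by
  induction l with
  | nil => simp [scanWordA, pvWellQuoted]
  | cons c l ih =>
    by_cases hterm : (PySem.Chars.isspace c || pvSpecial c) = true
    · have hq : pvQuote c = false := pvQuote_term c hterm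
      simp [scanWordA, pvWellQuoted, hterm, hq]
    · simp [scanWordA, pvWellQuoted, hterm, ih]

theorem pvWellQuoted_quoted (q : Char) (l : List Char)
    (h : pvWellQuoted (.quoted q) l = true) :
    ∃ p, scanQuoteA q l = some p ∧ pvWellQuoted .top p.2 = true := by
  induction l with
  | nil => simp [pvWellQuoted] at h
  | cons c l ih =>
    by_cases hc : c = q
    · subst hc
      refine ⟨([], l), by simp [scanQuoteA], ?_⟩
      simpa [pvWellQuoted] using h
    · simp only [pvWellQuoted, if_neg hc] at h
      obtain ⟨p, hp, hw⟩ := ih h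
      exact ⟨(c :: p.1, p.2), by simp [scanQuoteA, hc, hp], hw⟩

-- main loop invariant: A's pending tokens, filtered, prefix B's fold output
theorem main_inv (n : Nat) : ∀ (l : List Char), l.length ≤ n →
    pvWellQuoted .top l = true → ∀ (T : List (List Char)),
    (goA T l).filter (fun t => !t.isEmpty) =
      T.filter (fun t => !t.isEmpty) ++ finishB (l.foldl stepB ([], [], none)) := by
  induction n with
  | zero =>
    intro l hl _ T
    have : l = [] := List.eq_nil_of_length_eq_zero (Nat.le_zero.mp hl)
    subst this
    simp [goA, finishB]
  | succ n ih =>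
    intro l hl hw T
    cases l with
    | nil => simp [goA, finishB]
    | cons c cs =>
      have hl' : cs.length ≤ n := by simpa using Nat.le_of_succ_le_succ hl
      by_cases hsp : PySem.Chars.isspace c = true
      · -- whitespace: both sides skip c
        have hq : pvQuote c = false := by
          by_contra h
          have : c = '\'' ∨ c = '"' := by
            have h' : pvQuote c = true := by simpa using h
            simpa [pvQuote] using h'
          rcases this with rfl | rfl <;> exact absurd hsp (by decide)
        have hspec0 : pvSpecial c = false := by
          by_contra h
          have h' : pvSpecial c = true := by simpa using h
          have : ((c = '(' ∨ c = ')') ∨ c = '&') ∨ c = '|' := by simpa [pvSpecial] using h'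
          rcases this with ((rfl | rfl) | rfl) | rfl <;> exact absurd hsp (by decide)
        have hw' : pvWellQuoted .top cs = true := by
          simpa [pvWellQuoted, hq, hsp] using hw
        have hA : goA T (c :: cs) = goA T cs := by rw [goA]; simp [hsp]
        have hB : stepB ([], [], none) c = ([], [], none) := by
          simp [stepB, hq, hsp, hspec0]
        rw [hA, ih cs hl' hw' T]
        simp [hB]
      · by_cases hspec : pvSpecial c = true
        · -- special character: both sides emit [c]
          have hq : pvQuote c = false := pvQuote_term c (by simp [hspec])
          have hw' : pvWellQuoted .top cs = true := by
            simpa [pvWellQuoted, hq, hspec] using hw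
          have hA : goA T (c :: cs) = goA (T ++ [[c]]) cs := by
            rw [goA]; simp [hsp, hspec]
          have hB : stepB ([], [], none) c = ([[c]], [], none) := by
            simp [stepB, hq, hspec]
          rw [hA, ih cs hl' hw' (T ++ [[c]])]
          simp only [List.foldl_cons, hB]
          rw [foldl_stepB_prefix cs [[c]] [] none, finishB_prefix]
          simp
        · by_cases hqt : pvQuote c = true
          · -- quoted span
            have hwq : pvWellQuoted (.quoted c) cs = true := by
              simpa [pvWellQuoted, hqt] using hw
            obtain ⟨p, hp, hwr⟩ := pvWellQuoted_quoted c cs hwq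
            have hA : goA T (c :: cs) = goA (T ++ [PySem.Chars.strip p.1]) p.2 := by
              rw [goA]
              simp [hsp, hspec, hqt]
              split
              · rename_i h; rw [h] at hp; cases hp
              · rename_i p' h; rw [hp] at h; cases h; rfl
            have hB : stepB ([], [], none) c = ([], [], some c) := by
              simp [stepB, hqt]
            have hlen : p.2.length ≤ n :=
              le_trans (scanQuoteA_rest_le c cs p hp) hl'
            rw [hA, ih p.2 hlen hwr (T ++ [PySem.Chars.strip p.1])]
            simp only [List.foldl_cons, hB]
            rw [foldl_stepB_quoted c cs p hp [] []]
            simp only [List.nil_append]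
            by_cases he : (PySem.Chars.strip p.1).isEmpty = true
            · simp [he]
            · simp only [if_neg he]
              rw [foldl_stepB_prefix p.2 [PySem.Chars.strip p.1] [] none, finishB_prefix]
              simp [he]
          · -- bareword run
            have hterm : (PySem.Chars.isspace c || pvSpecial c) = false := by
              simp [hsp, hspec]
            have hw' : pvWellQuoted .word cs = true := by
              simpa [pvWellQuoted, hqt, hterm, hsp, hspec] using hw
            have hwr : pvWellQuoted .top (scanWordA cs).2 = true := by
              rw [← pvWellQuoted_word]; exact hw'
            have hstrip : PySem.Chars.strip (c :: (scanWordA cs).1) = c :: (scanWordA cs).1 := by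
              apply strip_of_no_space
              intro x hx
              rcases List.mem_cons.mp hx with rfl | hx
              · simpa using hsp
              · exact scanWordA_no_space cs x hx
            have hA : goA T (c :: cs) =
                goA (T ++ [PySem.Chars.strip (c :: (scanWordA cs).1)]) (scanWordA cs).2 := by
              rw [goA]; simp [hsp, hspec, hqt]
            have hB : stepB ([], [], none) c = ([], [c], none) := by
              simp [stepB, hqt, hsp, hspec]
            have hlen : (scanWordA cs).2.length ≤ n :=
              le_trans (scanWordA_rest_le cs) hl'
            rw [hA, ih (scanWordA cs).2 hlen hwr _]
            simp only [List.foldl_cons, hB]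
            rw [foldl_stepB_word cs [] [c] (by simp)]
            simp only [List.nil_append]
            rw [foldl_stepB_prefix (scanWordA cs).2 [[c] ++ (scanWordA cs).1] [] none,
              finishB_prefix]
            simp [hstrip]

-- ===== VERDICT (by name: the statement is the Claim_ definition above) =====
theorem tokenize_filter_expression_py_spec : Claim_equal_tokenize_filter_expression_py := by
  intro e _ hpre
  unfold Spec_tokenize_filter_expression_py tokenize_filter_expression_py
    tokenize_filter_expression_py_alt
  have := main_inv e.toList.length e.toList le_rfl hpre []
  rw [this]
  simp
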